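-- pv_equiv track=rewrite | github.com/JKatzwinkel/advent_of_code-2024 | 241219/j.py | widest_first
-- ===== SOURCE A (Python) =====
-- def widest_first(
--     towels: set[str], design: str
-- ) -> list[tuple[str, int]]:
--     result: list[tuple[str, int]] = []
--     for towel in sorted(towels, key=len, reverse=True):
--         if towel not in design:
--             continue
--         result.append(
--             (towel, design.index(towel))
--         )
--     return result
-- ===== SOURCE B (Python) =====
-- def widest_first(
--     towels: set[str], design: str
-- ) -> list[tuple[str, int]]:
--     # bucket-by-length (counting-sort style): no comparison sort at all
--     maxlen = -1
--     for towel in towels: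
--         if len(towel) > maxlen:
--             maxlen = len(towel)
--     buckets: dict[int, list[str]] = {}
--     for towel in towels:
--         buckets.setdefault(len(towel), []).append(towel)
--     result: list[tuple[str, int]] = []
--     for length in range(maxlen, -1, -1):
--         for towel in buckets.get(length, []):
--             idx = design.find(towel)
--             if idx >= 0:
--                 result.append((towel, idx))
--     return result
-- ===== Notes on version B (the rewrite author's own statement) =====
-- stated objective: alternative
-- what changed: B replaces A's comparison sort entirely: it buckets the towels by length into a dict, tracks the maximum length, and then walks the lengths from maxlen down to 0 emitting each bucket's towels that occur in design with their design.find index (a counting-sort-style traversal instead of sorted(key=len, reverse=True) followed by a filter).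
import Mathlib
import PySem

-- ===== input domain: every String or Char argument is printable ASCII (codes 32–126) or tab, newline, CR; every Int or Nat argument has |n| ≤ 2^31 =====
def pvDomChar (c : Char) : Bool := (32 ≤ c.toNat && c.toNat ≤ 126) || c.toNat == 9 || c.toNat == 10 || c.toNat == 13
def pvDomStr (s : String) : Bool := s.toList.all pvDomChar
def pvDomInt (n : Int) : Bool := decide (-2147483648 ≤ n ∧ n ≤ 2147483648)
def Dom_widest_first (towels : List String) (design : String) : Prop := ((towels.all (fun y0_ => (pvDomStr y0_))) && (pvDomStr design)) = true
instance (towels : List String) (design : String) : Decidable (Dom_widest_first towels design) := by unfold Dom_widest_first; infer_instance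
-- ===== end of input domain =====

-- B replaces A's comparison sort by bucketing the towels by length and walking the
-- lengths from the maximum down to 0 (counting-sort-style traversal, no sort call).

-- ===== PORT A =====
-- design.index(towel) is ported as PySem.Str.find: exact here because the call is guarded by
-- 'towel in design', under which index and find agree (no ValueError is reachable).
def widest_first (towels : List String) (design : String) : List (String × Int) :=
  (PySem.List.sorted towels (fun t => PySem.Str.len t) true).foldl
    (fun result towel =>
      if !(PySem.Str.isIn towel design) then result
      else result ++ [(towel, PySem.Str.find design towel)])
    []

-- ===== PORT B =====
def widest_first_alt (towels : List String) (design : String) : List (String × Int) :=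
  let maxlen := towels.foldl
    (fun maxlen towel =>
      if PySem.Str.len towel > maxlen then PySem.Str.len towel else maxlen) (-1)
  let buckets := towels.foldl
    (fun buckets towel =>
      PySem.Dict.modify buckets (PySem.Str.len towel) [] (fun l => l ++ [towel]))
    PySem.Dict.empty
  (PySem.List.pyRange maxlen (-1) (-1)).foldl
    (fun result length =>
      (buckets.getD length []).foldl
        (fun result towel =>
          let idx := PySem.Str.find design towel
          if 0 ≤ idx then result ++ [(towel, idx)] else result)
        result)
    []

-- ===== PRECONDITION & SPEC =====
def Spec_widest_first (towels : List String) (design : String) (out : List (String × Int)) : Prop := out = widest_first_alt towels design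
instance (towels : List String) (design : String) (out : List (String × Int)) : Decidable (Spec_widest_first towels design out) := by unfold Spec_widest_first; infer_instance

-- ===== CLAIM (what is proved, stated in full; the proofs are below) =====
def Claim_equal_widest_first : Prop := ∀ (towels : List String) (design : String), Dom_widest_first towels design → Spec_widest_first towels design (widest_first towels design)

-- ===== LEMMAS AND PROOFS =====

-- The two loop guards are the same Boolean test.
theorem pv_guard_eq (design t : String) :
    PySem.Str.isIn t design = decide (0 ≤ PySem.Str.find design t) := by
  simp only [PySem.Str.isIn_eq, PySem.Str.find_eq]
  by_cases h : t.toList <:+: design.toList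
  · rw [(PySem.Chars.isIn_iff_infix t.toList design.toList).mpr h, eq_comm, decide_eq_true_eq]
    exact (PySem.Chars.find_nonneg_iff design.toList t.toList).mpr h
  · rw [(PySem.Chars.isIn_eq_false_iff t.toList design.toList).mpr h, eq_comm,
      decide_eq_false_iff_not]
    exact fun hc => h ((PySem.Chars.find_nonneg_iff design.toList t.toList).mp hc)

-- A's loop is a filter-and-map of its (already sorted) input.
theorem pv_foldA (ts : List String) (design : String) :
    ts.foldl
      (fun result towel =>
        if !(PySem.Str.isIn towel design) then result
        else result ++ [(towel, PySem.Str.find design towel)])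
      []
    = (ts.filter (fun t => PySem.Str.isIn t design)).map
        (fun t => (t, PySem.Str.find design t)) := by
  have h := PySem.List.foldl_append_if (fun t => PySem.Str.isIn t design)
      (fun t => (t, PySem.Str.find design t)) ts ([] : List (String × Int))
  simp only [List.nil_append] at h
  rw [← h]
  congr 1
  funext acc x
  cases PySem.Str.isIn x design <;> simp

-- B's inner loop is a filter-and-map of its bucket, appended to the accumulator.
theorem pv_foldB_inner (bucket : List String) (design : String) (acc : List (String × Int)) :
    bucket.foldl
      (fun result towel =>
        let idx := PySem.Str.find design towel
        if 0 ≤ idx then result ++ [(towel, idx)] else result)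
      acc
    = acc ++ (bucket.filter (fun t => PySem.Str.isIn t design)).map
        (fun t => (t, PySem.Str.find design t)) := by
  have h := PySem.List.foldl_append_if (fun t => decide (0 ≤ PySem.Str.find design t))
      (fun t => (t, PySem.Str.find design t)) bucket acc
  rw [show (fun t => PySem.Str.isIn t design) = (fun t => decide (0 ≤ PySem.Str.find design t)) from funext (fun t => pv_guard_eq design t), ← h]
  congr 1
  funext a x
  by_cases hx : 0 ≤ PySem.Str.find design x <;> simp

-- insertBy walks past a block of elements it is not inserted before.
theorem pv_insertBy_pass {α : Type} (before : α → α → Bool) (x : α) (as bs : List α)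
    (h : ∀ y ∈ as, before x y = false) :
    PySem.List.insertBy before x (as ++ bs) = as ++ PySem.List.insertBy before x bs := by
  induction as with
  | nil => simp
  | cons a as ih =>
    simp only [List.cons_append, PySem.List.insertBy, h a (List.mem_cons_self),
      Bool.false_eq_true, if_false]
    rw [ih (fun y hy => h y (List.mem_cons_of_mem a hy))]

-- insertBy lands at the front when it precedes every element.
theorem pv_insertBy_front {α : Type} (before : α → α → Bool) (x : α) (bs : List α)
    (h : ∀ y ∈ bs, before x y = true) :
    PySem.List.insertBy before x bs = x :: bs := by
  cases bs with
  | nil => rfl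
  | cons b bs => simp [PySem.List.insertBy, h b (List.mem_cons_self)]

-- Inserting into a key-grouped list (groups listed by strictly descending key) appends the
-- new element at the end of its own key's group.
theorem pv_insertBy_flatMap {α : Type} (key : α → Int) (x : α) :
    ∀ (ks : List Int) (g : Int → List α),
      ks.Pairwise (· > ·) →
      (∀ L ∈ ks, ∀ y ∈ g L, key y = L) →
      key x ∈ ks →
      PySem.List.insertBy (fun a b => decide (key b < key a)) x (ks.flatMap g)
        = ks.flatMap (fun L => g L ++ if key x == L then [x] else []) := by
  intro ks
  induction ks with
  | nil => intro g _ _ hx; exact absurd hx (List.not_mem_nil)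
  | cons L ks ih =>
    intro g hpw hg hx
    have hd : ∀ L' ∈ ks, L' < L := fun L' h' => (List.pairwise_cons.mp hpw).1 L' h'
    have htl := (List.pairwise_cons.mp hpw).2
    simp only [List.flatMap_cons]
    by_cases hxL : key x = L
    · have hpass : ∀ y ∈ g L, (decide (key y < key x) : Bool) = false := by
        intro y hy
        have := hg L (List.mem_cons_self) y hy
        simp [this, hxL]
      rw [pv_insertBy_pass _ _ _ _ hpass]
      have hfront : ∀ y ∈ ks.flatMap g, (decide (key y < key x) : Bool) = true := by
        intro y hy
        rcases List.mem_flatMap.mp hy with ⟨L', hL', hyL'⟩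
        have := hg L' (List.mem_cons_of_mem L hL') y hyL'
        simp [this, hxL]
        exact hd L' hL'
      rw [pv_insertBy_front _ _ _ hfront]
      have hrest : ks.flatMap (fun L' => g L' ++ if key x == L' then [x] else []) = ks.flatMap g := by
        apply List.flatMap_congr
        intro L' hL'
        have : key x ≠ L' := by have := hd L' hL'; omega
        simp [this]
      rw [hrest]
      simp [hxL]
    · have hxM : key x ∈ ks := by
        rcases List.mem_cons.mp hx with h | h
        · exact absurd h hxL
        · exact h
      have hxlt : key x < L := hd _ hxM
      have hpass : ∀ y ∈ g L, (decide (key y < key x) : Bool) = false := by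
        intro y hy
        have := hg L (List.mem_cons_self) y hy
        simp [this]; omega
      rw [pv_insertBy_pass _ _ _ _ hpass,
        ih g htl (fun L' h' y hy => hg L' (List.mem_cons_of_mem L h') y hy) hxM]
      have : (key x == L) = false := by simp [hxL]
      simp [this]

-- Python's stable descending sort, written as the insertion fold, equals the concatenation
-- of the key groups (in input order) listed by strictly descending key.
theorem pv_foldl_insertBy {α : Type} (key : α → Int) (ks : List Int)
    (hks : ks.Pairwise (· > ·)) :
    ∀ xs : List α, (∀ t ∈ xs, key t ∈ ks) →
      xs.foldl (fun acc x => PySem.List.insertBy (fun a b => decide (key b < key a)) x acc) []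
        = ks.flatMap (fun L => xs.filter (fun y => key y == L)) := by
  intro xs
  induction xs using List.reverseRecOn with
  | nil => simp
  | append_singleton xs x ih =>
    intro hmem
    rw [List.foldl_append, List.foldl_cons, List.foldl_nil,
      ih (fun t ht => hmem t (List.mem_append_left _ ht)),
      pv_insertBy_flatMap key x ks _ hks
        (fun L hL y hy => by simpa using (List.mem_filter.mp hy).2)
        (hmem x (List.mem_append_right _ (List.mem_cons_self)))]
    apply List.flatMap_congr
    intro L _
    by_cases h : key x = L <;> simp [List.filter_append, h]

theorem pv_sorted_grouped {α : Type} (key : α → Int) (ks : List Int) (xs : List α)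
    (hks : ks.Pairwise (· > ·)) (hmem : ∀ t ∈ xs, key t ∈ ks) :
    PySem.List.sorted xs key true = ks.flatMap (fun L => xs.filter (fun y => key y == L)) := by
  rw [PySem.List.sorted_rev_eq_foldl_insertBy]
  exact pv_foldl_insertBy key ks hks xs hmem

-- The bucket dict's entry for a length is the input-order list of towels of that length.
theorem pv_getD_buckets :
    ∀ (ts : List String) (d : PySem.Dict Int (List String)) (L : Int),
      (ts.foldl (fun d t => PySem.Dict.modify d (PySem.Str.len t) [] (fun l => l ++ [t])) d).getD L []
        = d.getD L [] ++ ts.filter (fun t => PySem.Str.len t == L) := by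
  intro ts
  induction ts with
  | nil => simp
  | cons t ts ih =>
    intro d L
    rw [List.foldl_cons, ih, PySem.Dict.getD_modify, List.filter_cons]
    by_cases h : L = PySem.Str.len t
    · rw [if_pos h, if_pos (by simp only [beq_iff_eq]; exact h.symm), h,
        List.append_assoc, List.singleton_append]
    · rw [if_neg h, if_neg (by simp only [beq_iff_eq]; exact fun hc => h hc.symm)]

-- The running-maximum loop bounds every element (and its initial value).
theorem pv_foldl_max :
    ∀ (ts : List String) (a : Int),
      a ≤ ts.foldl (fun m t => if PySem.Str.len t > m then PySem.Str.len t else m) a ∧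
      ∀ t ∈ ts, PySem.Str.len t ≤
        ts.foldl (fun m t => if PySem.Str.len t > m then PySem.Str.len t else m) a := by
  intro ts
  induction ts with
  | nil => intro a; exact ⟨le_refl a, fun t ht => absurd ht (List.not_mem_nil)⟩
  | cons t ts ih =>
    intro a
    rw [List.foldl_cons]
    constructor
    · have h1 := (ih (if PySem.Str.len t > a then PySem.Str.len t else a)).1
      have h2 : a ≤ (if PySem.Str.len t > a then PySem.Str.len t else a) := by
        split_ifs <;> omega
      omega
    · intro u hu
      rcases List.mem_cons.mp hu with h | h
      · subst h
        have h1 := (ih (if PySem.Str.len u > a then PySem.Str.len u else a)).1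
        have h2 : PySem.Str.len u ≤ (if PySem.Str.len u > a then PySem.Str.len u else a) := by
          split_ifs <;> omega
        omega
      · exact (ih _).2 u h

-- The countdown range is strictly descending.
theorem pv_pyRange_desc (a : Int) :
    (PySem.List.pyRange a (-1) (-1)).Pairwise (· > ·) := by
  rw [PySem.List.pyRange_neg_one]
  rw [List.pairwise_map]
  exact List.pairwise_lt_range.imp (fun h => by omega)

-- filter-then-map distributes over the grouped concatenation.
theorem pv_flatMap_post (design : String) (ks : List Int) (g : Int → List String) :
    ((ks.flatMap g).filter (fun t => PySem.Str.isIn t design)).map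
        (fun t => (t, PySem.Str.find design t))
      = ks.flatMap (fun L => (((g L).filter (fun t => PySem.Str.isIn t design)).map
          (fun t => (t, PySem.Str.find design t)))) := by
  induction ks with
  | nil => simp
  | cons L ks ih =>
    rw [List.flatMap_cons, List.filter_append, List.map_append, ih, List.flatMap_cons]

-- ===== VERDICT (by name: the statement is the Claim_ definition above) =====
theorem widest_first_spec : Claim_equal_widest_first := by
  intro towels design _
  unfold Spec_widest_first widest_first widest_first_alt
  simp only [pv_foldB_inner]
  rw [PySem.List.foldl_append_eq_flatMap
    (g := fun length => ((((towels.foldl (fun buckets towel =>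
        PySem.Dict.modify buckets (PySem.Str.len towel) [] (fun l => l ++ [towel]))
        PySem.Dict.empty).getD length []).filter (fun t => PySem.Str.isIn t design)).map
        (fun t => (t, PySem.Str.find design t))))]
  rw [List.nil_append, pv_foldA]
  have hmax := pv_foldl_max towels (-1)
  set M := towels.foldl (fun m t => if PySem.Str.len t > m then PySem.Str.len t else m) (-1) with hM
  have hmem : ∀ t ∈ towels, PySem.Str.len t ∈ PySem.List.pyRange M (-1) (-1) := by
    intro t ht
    rw [PySem.List.mem_pyRange_neg_one]
    have h0 : (0 : Int) ≤ PySem.Str.len t := by rw [PySem.Str.len_eq]; positivity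
    exact ⟨by omega, hmax.2 t ht⟩
  rw [pv_sorted_grouped (fun t => PySem.Str.len t) (PySem.List.pyRange M (-1) (-1)) towels
    (pv_pyRange_desc M) hmem]
  rw [pv_flatMap_post]
  apply List.flatMap_congr
  intro L _
  rw [pv_getD_buckets, PySem.Dict.getD_empty, List.nil_append]
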